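-- pv_equiv track=rewrite | github.com/lottarantala/miinaharava | miinaharava.py | laske_miinat
-- ===== SOURCE A (Python) =====
-- def laske_miinat(x, y, lista):
--     miinat = 0
--     x_rajat = {x, x - 1, x + 1}
--     y_rajat = {y, y - 1, y + 1}
--     for y, i in enumerate(lista):
--         for x, ruutu in enumerate(i):
--             if y in y_rajat and x in x_rajat and ruutu == "x":
--                 miinat = miinat + 1
--     return miinat
-- ===== SOURCE B (Python) =====
-- def laske_miinat(x, y, lista):
--     miinat = 0
--     for ny in (y - 1, y, y + 1):
--         if 0 <= ny < len(lista):
--             rivi = lista[ny]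
--             for nx in (x - 1, x, x + 1):
--                 if 0 <= nx < len(rivi) and rivi[nx] == "x":
--                     miinat += 1
--     return miinat
-- ===== Notes on version B (the rewrite author's own statement) =====
-- stated objective: faster
-- what changed: Instead of scanning every cell of the whole grid and testing its coordinates against the neighbourhood sets, B directly indexes the at-most-9 neighbour cells with bounds checks.
import Mathlib
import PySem

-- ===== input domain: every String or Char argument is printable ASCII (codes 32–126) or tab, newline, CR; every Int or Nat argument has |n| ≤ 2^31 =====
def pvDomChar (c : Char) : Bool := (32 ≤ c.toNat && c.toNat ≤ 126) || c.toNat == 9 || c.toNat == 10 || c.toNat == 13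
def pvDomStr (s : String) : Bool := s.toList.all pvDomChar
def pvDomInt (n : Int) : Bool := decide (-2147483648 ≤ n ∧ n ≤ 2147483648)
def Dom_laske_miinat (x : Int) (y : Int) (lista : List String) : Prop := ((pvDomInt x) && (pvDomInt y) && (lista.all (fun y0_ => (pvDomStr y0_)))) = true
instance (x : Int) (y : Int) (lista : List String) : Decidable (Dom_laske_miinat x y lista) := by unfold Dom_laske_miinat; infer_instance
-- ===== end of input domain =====

-- B replaces A's scan of the whole grid with direct bounds-checked indexing of the
-- at-most-9 neighbour cells (objective: faster, O(1) vs O(rows*cols); return value only, no mutation).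

-- ===== PORT A =====
def laske_miinat (x : Int) (y : Int) (lista : List String) : Int :=
  let x_rajat : PySem.Set Int := PySem.Set.ofList [x, x - 1, x + 1]
  let y_rajat : PySem.Set Int := PySem.Set.ofList [y, y - 1, y + 1]
  (PySem.List.enumerate lista).foldl
    (fun miinat q =>
      (PySem.List.enumerate q.2.toList).foldl
        (fun miinat p =>
          if q.1 ∈ y_rajat ∧ p.1 ∈ x_rajat ∧ p.2 = 'x' then miinat + 1 else miinat)
        miinat)
    0

-- ===== PORT B =====
def laske_miinat_alt (x : Int) (y : Int) (lista : List String) : Int :=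
  [y - 1, y, y + 1].foldl
    (fun miinat ny =>
      if 0 ≤ ny ∧ ny < PySem.List.len lista then
        let rivi := PySem.List.pyGetD lista ny ""
        [x - 1, x, x + 1].foldl
          (fun miinat nx =>
            if (0 ≤ nx ∧ nx < PySem.Str.len rivi) ∧ PySem.Str.pyGet? rivi nx = some 'x' then
              miinat + 1
            else miinat)
          miinat
      else miinat)
    0

-- ===== PRECONDITION & SPEC =====
def Spec_laske_miinat (x : Int) (y : Int) (lista : List String) (out : Int) : Prop := out = laske_miinat_alt x y lista
instance (x : Int) (y : Int) (lista : List String) (out : Int) : Decidable (Spec_laske_miinat x y lista out) := by unfold Spec_laske_miinat; infer_instance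

-- ===== CLAIM (what is proved, stated in full; the proofs are below) =====
def Claim_equal_laske_miinat : Prop := ∀ (x : Int) (y : Int) (lista : List String), Dom_laske_miinat x y lista → Spec_laske_miinat x y lista (laske_miinat x y lista)

-- ===== LEMMAS AND PROOFS =====

-- a counting foldl as a map-sum
theorem pv_foldl_if_count {β : Type} (P : β → Prop) [DecidablePred P] :
    ∀ (l : List β) (acc : Int),
      l.foldl (fun m p => if P p then m + 1 else m) acc
        = acc + (l.map (fun p => if P p then (1 : Int) else 0)).sum := by
  intro l
  induction l with
  | nil => intro acc; simp
  | cons r t ih =>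
    intro acc
    simp only [List.foldl_cons, List.map_cons, List.sum_cons, ih]
    split_ifs <;> ring

-- the nested counting foldl of port A as a sum of row sums
theorem pv_foldl_inner_sum {β γ : Type} (inner : β → List γ) (P : β → γ → Prop)
    [∀ b c, Decidable (P b c)] (l : List β) (acc : Int) :
    l.foldl (fun m q => (inner q).foldl (fun m p => if P q p then m + 1 else m) m) acc
      = acc + (l.map (fun q => ((inner q).map (fun p => if P q p then (1 : Int) else 0)).sum)).sum := by
  simp only [pv_foldl_if_count, PySem.List.foldl_add]

-- a membership test over three pairwise-distinct values splits into three point tests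
theorem pv_sum_if_or3 {σ : Type} (h : σ → Int) (a b c : Int)
    (hab : a ≠ b) (hac : a ≠ c) (hbc : b ≠ c) (l : List (Int × σ)) :
    (l.map (fun p => if p.1 = a ∨ p.1 = b ∨ p.1 = c then h p.2 else 0)).sum
      = (l.map (fun p => if p.1 = a then h p.2 else 0)).sum
        + (l.map (fun p => if p.1 = b then h p.2 else 0)).sum
        + (l.map (fun p => if p.1 = c then h p.2 else 0)).sum := by
  induction l with
  | nil => simp
  | cons r t ih =>
    simp only [List.map_cons, List.sum_cons, ih]
    have : (if r.1 = a ∨ r.1 = b ∨ r.1 = c then h r.2 else 0)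
        = (if r.1 = a then h r.2 else 0) + (if r.1 = b then h r.2 else 0)
          + (if r.1 = c then h r.2 else 0) := by
      split_ifs <;> omega
    rw [this]; ring

-- selecting a single enumerate index is a bounds-checked lookup
theorem pv_sum_if_eq_idx {β : Type} (g : β → Int) (d : β) :
    ∀ (l : List β) (s v : Int),
      ((PySem.List.enumerate l s).map (fun p => if p.1 = v then g p.2 else 0)).sum
        = if 0 ≤ v - s ∧ v - s < (l.length : Int) then g (PySem.List.pyGetD l (v - s) d) else 0 := by
  intro l
  induction l with
  | nil =>
    intro s v
    simp only [PySem.List.enumerate_nil, List.map_nil, List.sum_nil, List.length_nil]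
    split_ifs with h
    · omega
    · rfl
  | cons r t ih =>
    intro s v
    simp only [PySem.List.enumerate_cons, List.map_cons, List.sum_cons, List.length_cons, ih]
    by_cases hv : s = v
    · subst hv
      rw [if_pos rfl, if_neg (by omega), if_pos (by push_cast; omega)]
      have h0 : s - s = (0 : Int) := by ring
      rw [h0, PySem.List.pyGetD_zero_cons]
      ring
    · rw [if_neg hv]
      by_cases h2 : 0 ≤ v - (s + 1) ∧ v - (s + 1) < (t.length : Int)
      · rw [if_pos h2, if_pos (by push_cast; omega)]
        rw [PySem.List.pyGetD_eq_getElem (r :: t) d (by omega)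
              (by simp only [List.length_cons]; push_cast; omega),
            PySem.List.pyGetD_eq_getElem t d h2.1 h2.2]
        have htn : (v - s).toNat = (v - (s + 1)).toNat + 1 := by omega
        simp only [htn, List.getElem_cons_succ]
        ring
      · rw [if_neg h2, if_neg (by push_cast; omega)]
        ring

-- a whole-window sum over enumerate equals three bounds-checked lookups
theorem pv_sum_enum_window {β : Type} (g : β → Int) (d : β) (a : Int) (l : List β) :
    ((PySem.List.enumerate l).map
        (fun p => if p.1 = a ∨ p.1 = a - 1 ∨ p.1 = a + 1 then g p.2 else 0)).sum
      = (if 0 ≤ a ∧ a < (l.length : Int) then g (PySem.List.pyGetD l a d) else 0)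
        + (if 0 ≤ a - 1 ∧ a - 1 < (l.length : Int) then g (PySem.List.pyGetD l (a - 1) d) else 0)
        + (if 0 ≤ a + 1 ∧ a + 1 < (l.length : Int) then g (PySem.List.pyGetD l (a + 1) d) else 0) := by
  rw [pv_sum_if_or3 g a (a - 1) (a + 1) (by omega) (by omega) (by omega)]
  rw [pv_sum_if_eq_idx g d l 0 a, pv_sum_if_eq_idx g d l 0 (a - 1), pv_sum_if_eq_idx g d l 0 (a + 1)]
  simp only [sub_zero]

-- B's inner fold over one row, named for the rewriting below
def pvRowCnt (x : Int) (rivi : String) : Int :=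
  [x - 1, x, x + 1].foldl
    (fun m nx =>
      if (0 ≤ nx ∧ nx < PySem.Str.len rivi) ∧ PySem.Str.pyGet? rivi nx = some 'x' then m + 1 else m)
    0

theorem pv_chars_get (l : List Char) (i : Int) :
    PySem.Chars.pyGet? l i = PySem.List.pyGet? l i := rfl

-- per-character agreement of the two cell tests
theorem pv_cell_eq (rivi : String) (u : Int) :
    (if 0 ≤ u ∧ u < (rivi.toList.length : Int) then
        (if (PySem.List.pyGetD rivi.toList u 'x') = 'x' then (1 : Int) else 0) else 0)
      = if (0 ≤ u ∧ u < PySem.Str.len rivi) ∧ PySem.Str.pyGet? rivi u = some 'x' then (1 : Int) else 0 := by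
  by_cases h : 0 ≤ u ∧ u < (rivi.toList.length : Int)
  · rw [if_pos h, PySem.List.pyGetD_eq_getElem rivi.toList 'x' h.1 h.2]
    simp only [PySem.Str.pyGet?_eq, pv_chars_get, PySem.Str.len_eq,
      PySem.List.pyGet?_eq_some_getElem rivi.toList h.1 h.2, Option.some.injEq, h, true_and]
  · rw [if_neg h]
    have h2 : ¬ (0 ≤ u ∧ u < PySem.Str.len rivi) := by
      rw [PySem.Str.len_eq]; exact h
    rw [if_neg (fun hc => h2 hc.1)]

-- the inner row count of A equals B's three bounds-checked character probes
theorem pv_row_eq (x : Int) (rivi : String) :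
    ((PySem.List.enumerate rivi.toList).map
        (fun p => if (p.1 = x ∨ p.1 = x - 1 ∨ p.1 = x + 1) ∧ p.2 = 'x' then (1 : Int) else 0)).sum
      = pvRowCnt x rivi := by
  simp only [ite_and]
  rw [pv_sum_enum_window (fun c => if c = 'x' then (1 : Int) else 0) 'x' x rivi.toList]
  simp only [pv_cell_eq, pvRowCnt, List.foldl_cons, List.foldl_nil]
  split_ifs <;> ring

-- a foldl whose step adds a per-element contribution is a map-sum
theorem pv_foldl_step {β : Type} (f : Int → β → Int) (t : β → Int)
    (hf : ∀ (acc : Int) (b : β), f acc b = acc + t b) :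
    ∀ (l : List β) (acc : Int), l.foldl f acc = acc + (l.map t).sum := by
  intro l
  induction l with
  | nil => intro acc; simp
  | cons r u ih =>
    intro acc
    simp only [List.foldl_cons, List.map_cons, List.sum_cons, ih, hf]
    ring

-- ===== VERDICT (by name: the statement is the Claim_ definition above) =====
set_option maxHeartbeats 1000000 in
theorem laske_miinat_spec : Claim_equal_laske_miinat := by
  intro x y lista _
  show laske_miinat x y lista = laske_miinat_alt x y lista
  have hA : laske_miinat x y lista
      = ((PySem.List.enumerate lista).map
          (fun q => ((PySem.List.enumerate q.2.toList).map
            (fun p => if q.1 ∈ PySem.Set.ofList [y, y - 1, y + 1]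
                ∧ p.1 ∈ PySem.Set.ofList [x, x - 1, x + 1] ∧ p.2 = 'x'
              then (1 : Int) else 0)).sum)).sum := by
    show (PySem.List.enumerate lista).foldl
        (fun miinat q => (PySem.List.enumerate q.2.toList).foldl
          (fun miinat p => if q.1 ∈ PySem.Set.ofList [y, y - 1, y + 1]
              ∧ p.1 ∈ PySem.Set.ofList [x, x - 1, x + 1] ∧ p.2 = 'x'
            then miinat + 1 else miinat) miinat) 0 = _
    rw [pv_foldl_inner_sum (fun q : Int × String => PySem.List.enumerate q.2.toList)
          (fun q p => q.1 ∈ PySem.Set.ofList [y, y - 1, y + 1]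
            ∧ p.1 ∈ PySem.Set.ofList [x, x - 1, x + 1] ∧ p.2 = 'x')
          (PySem.List.enumerate lista) 0]
    rw [zero_add]
  have hG : ∀ q : Int × String,
      ((PySem.List.enumerate q.2.toList).map
        (fun p => if q.1 ∈ PySem.Set.ofList [y, y - 1, y + 1]
            ∧ p.1 ∈ PySem.Set.ofList [x, x - 1, x + 1] ∧ p.2 = 'x'
          then (1 : Int) else 0)).sum
      = if q.1 = y ∨ q.1 = y - 1 ∨ q.1 = y + 1 then pvRowCnt x q.2 else 0 := by
    intro q
    simp only [PySem.Set.mem_ofList, List.mem_cons, List.not_mem_nil, or_false]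
    by_cases hq : q.1 = y ∨ q.1 = y - 1 ∨ q.1 = y + 1
    · rw [if_pos hq]
      simp only [hq, true_and]
      exact pv_row_eq x q.2
    · rw [if_neg hq]
      simp [hq]
  rw [hA]
  rw [List.map_congr_left (fun q _ => hG q)]
  rw [pv_sum_enum_window (fun rivi => pvRowCnt x rivi) "" y lista]
  have hstep : ∀ (acc ny : Int),
      (fun (miinat ny : Int) =>
        if 0 ≤ ny ∧ ny < PySem.List.len lista then
          let rivi := PySem.List.pyGetD lista ny ""
          [x - 1, x, x + 1].foldl
            (fun miinat nx =>
              if (0 ≤ nx ∧ nx < PySem.Str.len rivi) ∧ PySem.Str.pyGet? rivi nx = some 'x' then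
                miinat + 1
              else miinat)
            miinat
        else miinat) acc ny
      = acc + (if 0 ≤ ny ∧ ny < (lista.length : Int) then
          pvRowCnt x (PySem.List.pyGetD lista ny "") else 0) := by
    intro acc ny
    show (if 0 ≤ ny ∧ ny < PySem.List.len lista then
        [x - 1, x, x + 1].foldl
          (fun miinat nx =>
            if (0 ≤ nx ∧ nx < PySem.Str.len (PySem.List.pyGetD lista ny ""))
                ∧ PySem.Str.pyGet? (PySem.List.pyGetD lista ny "") nx = some 'x' then
              miinat + 1
            else miinat)
          acc
      else acc)
      = acc + (if 0 ≤ ny ∧ ny < (lista.length : Int) then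
          pvRowCnt x (PySem.List.pyGetD lista ny "") else 0)
    rw [PySem.List.len_eq]
    split_ifs with h
    · rw [pv_foldl_if_count
            (fun nx => (0 ≤ nx ∧ nx < PySem.Str.len (PySem.List.pyGetD lista ny ""))
              ∧ PySem.Str.pyGet? (PySem.List.pyGetD lista ny "") nx = some 'x')
            [x - 1, x, x + 1] acc]
      unfold pvRowCnt
      rw [pv_foldl_if_count
            (fun nx => (0 ≤ nx ∧ nx < PySem.Str.len (PySem.List.pyGetD lista ny ""))
              ∧ PySem.Str.pyGet? (PySem.List.pyGetD lista ny "") nx = some 'x')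
            [x - 1, x, x + 1] 0]
      ring
    · ring
  have hB : laske_miinat_alt x y lista
      = 0 + ([y - 1, y, y + 1].map
          (fun ny => if 0 ≤ ny ∧ ny < (lista.length : Int) then
            pvRowCnt x (PySem.List.pyGetD lista ny "") else 0)).sum := by
    unfold laske_miinat_alt
    rw [pv_foldl_step _ _ hstep [y - 1, y, y + 1] 0]
  rw [hB]
  simp only [List.map_cons, List.map_nil, List.sum_cons, List.sum_nil]
  ring
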